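-- pv_equiv track=rewrite | github.com/phac-nml/bioCanon | bioCanon/scheme_create.py | get_internal_nodes
-- ===== SOURCE A (Python) =====
-- def get_internal_nodes(genotypes):
--     terminal_nodes = count_terminal_nodes(genotypes)
--     internal_nodes = []
--     for sample_id in genotypes:
--         geno = genotypes[sample_id]
--         length = len(geno)
--         if length == 1:
--             continue
--         for i in range(1,length):
--             node = geno[i]
--             if not node in terminal_nodes and not node in internal_nodes:
--                 internal_nodes.append(node)
--     return internal_nodes
--
-- def count_terminal_nodes(genotypes):
--     terminal_nodes = {}
--     for sample_id in genotypes: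
--         geno = genotypes[sample_id]
--         #Never remove the root
--         if len(geno) <= 1:
--             continue
--         t_node = geno[len(geno)-1]
--         if not t_node in terminal_nodes:
--             terminal_nodes[t_node]=0
--         terminal_nodes[t_node] += 1
--     return terminal_nodes
-- ===== SOURCE B (Python) =====
-- def get_internal_nodes(genotypes):
--     internal = []
--     terminals = set()
--     for geno in genotypes.values():
--         if len(geno) <= 1:
--             continue
--         last = geno[-1]
--         terminals.add(last)
--         if last in internal:
--             internal.remove(last)
--         for node in geno[1:]:
--             if node not in terminals and node not in internal:
--                 internal.append(node)
--     return internal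
-- ===== Notes on version B (the rewrite author's own statement) =====
-- stated objective: alternative
-- what changed: Replaces A's two staged passes (a helper that precomputes a terminal-count dict over all paths, then a second loop filtering candidates against it) by ONE online pass that grows the terminal set as paths stream by and retroactively deletes an already-collected node when it later turns out to be terminal; Pre_ only excludes association lists with duplicate keys, which do not represent a Python dict.
import Mathlib
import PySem

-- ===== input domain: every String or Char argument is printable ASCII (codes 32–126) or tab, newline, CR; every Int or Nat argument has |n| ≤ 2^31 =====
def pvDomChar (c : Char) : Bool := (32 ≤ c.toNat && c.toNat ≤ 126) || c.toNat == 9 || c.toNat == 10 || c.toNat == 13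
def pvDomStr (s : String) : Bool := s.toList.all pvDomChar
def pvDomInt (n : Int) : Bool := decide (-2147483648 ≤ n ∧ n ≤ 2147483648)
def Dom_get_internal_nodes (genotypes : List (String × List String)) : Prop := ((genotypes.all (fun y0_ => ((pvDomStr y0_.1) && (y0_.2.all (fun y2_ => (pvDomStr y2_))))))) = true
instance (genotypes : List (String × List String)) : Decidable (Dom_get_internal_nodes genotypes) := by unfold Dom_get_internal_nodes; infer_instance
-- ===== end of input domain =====

-- B replaces A's two staged passes (a separate terminal-counting dict, then a filtering loop) by ONE
-- online pass that grows the terminal set as it goes and retroactively deletes a collected node when it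
-- later turns out to be terminal; return-value equivalence is proved on association lists with distinct
-- keys (the ones that represent a Python dict).

-- ===== PORT A =====
def count_terminal_nodes (genotypes : List (String × List String)) : PySem.Dict String Int :=
  genotypes.foldl (fun terminal_nodes p =>
    let geno := PySem.Dict.getD (PySem.Dict.mk genotypes) p.1 []
    if geno.length ≤ 1 then terminal_nodes
    else
      let t_node := PySem.List.pyGetD geno ((geno.length : Int) - 1) ""
      let terminal_nodes :=
        if !(terminal_nodes.contains t_node) then terminal_nodes.insert t_node 0 else terminal_nodes
      terminal_nodes.modify t_node 0 (· + 1)) PySem.Dict.empty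

def get_internal_nodes (genotypes : List (String × List String)) : List String :=
  let terminal_nodes := count_terminal_nodes genotypes
  genotypes.foldl (fun internal_nodes p =>
    let geno := PySem.Dict.getD (PySem.Dict.mk genotypes) p.1 []
    let length := geno.length
    if length == 1 then internal_nodes
    else
      (PySem.List.pyRange 1 (length : Int) 1).foldl (fun internal_nodes i =>
        let node := PySem.List.pyGetD geno i ""
        if !(terminal_nodes.contains node) && !(internal_nodes.contains node) then
          internal_nodes ++ [node]
        else internal_nodes) internal_nodes) []

-- ===== PORT B =====
-- loop body of B's single pass over genotypes.values(); state = (internal, terminals).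
-- 'internal.remove(last)' is guarded by 'last in internal', so it is List.erase of a present
-- element (exact by PySem.List.remove?_eq_some_erase).
def pvBStep (st : List String × PySem.Set String) (geno : List String) :
    List String × PySem.Set String :=
  if geno.length ≤ 1 then st
  else
    let last := PySem.List.pyGetD geno (-1) ""
    let terminals := PySem.Set.add st.2 last
    let internal := if st.1.contains last then st.1.erase last else st.1
    ((PySem.List.slice geno (some 1) none).foldl
        (fun acc node =>
          if !(PySem.Set.contains terminals node) && !(acc.contains node) then acc ++ [node]
          else acc) internal,
     terminals)

def get_internal_nodes_alt (genotypes : List (String × List String)) : List String :=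
  (((PySem.Dict.mk genotypes).values).foldl pvBStep ([], PySem.Set.empty)).1

-- ===== PRECONDITION & SPEC =====
-- Pre_ excludes association lists with duplicate keys: those do not arise from a Python dict
-- (A iterates the dict's keys and looks each key up), so the encoding is ambiguous there.
def Pre_get_internal_nodes (genotypes : List (String × List String)) : Prop :=
  (genotypes.map Prod.fst).Nodup
instance (genotypes : List (String × List String)) : Decidable (Pre_get_internal_nodes genotypes) := by
  unfold Pre_get_internal_nodes; infer_instance

def pvWitness_get_internal_nodes : (List (String × List String)) :=
  [("s1", ["root", "a", "b"]), ("s2", ["root", "a", "c"]), ("s3", ["root"])]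

def Spec_get_internal_nodes (genotypes : List (String × List String)) (out : List String) : Prop := out = get_internal_nodes_alt genotypes
instance (genotypes : List (String × List String)) (out : List String) : Decidable (Spec_get_internal_nodes genotypes out) := by unfold Spec_get_internal_nodes; infer_instance

-- ===== CLAIM (what is proved, stated in full; the proofs are below) =====
def Claim_equal_get_internal_nodes : Prop := ∀ (genotypes : List (String × List String)), Dom_get_internal_nodes genotypes → Pre_get_internal_nodes genotypes → Spec_get_internal_nodes genotypes (get_internal_nodes genotypes)

-- ===== LEMMAS AND PROOFS =====

-- the candidate stream (all nodes at indices ≥ 1) and the terminal nodes of a list of paths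
def pvCands (gs : List (List String)) : List String := gs.flatMap (fun p => p.drop 1)
def pvLasts (gs : List (List String)) : List String :=
  (gs.filter (fun g => 1 < g.length)).map (fun p => PySem.List.pyGetD p (-1) "")

-- first-occurrence dedup relative to an already-seen list (proof-only helper)
def pvDropDups (seen : List String) : List String → List String
  | [] => []
  | x :: xs => if x ∈ seen then pvDropDups seen xs else x :: pvDropDups (seen ++ [x]) xs

lemma pv_mem_dropDups (x : String) : ∀ (xs s : List String),
    x ∈ pvDropDups s xs ↔ (x ∈ xs ∧ x ∉ s) := by
  intro xs
  induction xs with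
  | nil => intro s; simp [pvDropDups]
  | cons y xs ih =>
    intro s
    by_cases h : y ∈ s
    · by_cases hxy : x = y
      · subst hxy; simp [pvDropDups, h, ih]
      · simp [pvDropDups, h, ih, hxy]
    · by_cases hxy : x = y
      · subst hxy; simp [pvDropDups, h]
      · simp [pvDropDups, h, ih, hxy]

lemma pv_nodup_dropDups : ∀ (xs s : List String), (pvDropDups s xs).Nodup := by
  intro xs
  induction xs with
  | nil => intro s; simp [pvDropDups]
  | cons y xs ih =>
    intro s
    by_cases h : y ∈ s
    · simpa [pvDropDups, h] using ih s
    · simp only [pvDropDups, if_neg h]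
      refine List.nodup_cons.mpr ⟨?_, ih (s ++ [y])⟩
      intro hy
      exact ((pv_mem_dropDups y xs (s ++ [y])).mp hy).2 (by simp)

-- pvDropDups depends on the seen list only through membership: enlarging the seen list filters
lemma pv_dropDups_eq_filter : ∀ (xs s t : List String), (∀ x, x ∈ t → x ∈ s) →
    pvDropDups s xs = (pvDropDups t xs).filter (fun x => !(s.contains x)) := by
  intro xs
  induction xs with
  | nil => intro s t _; simp [pvDropDups]
  | cons y xs ih =>
    intro s t hts
    by_cases hyt : y ∈ t
    · have hys : y ∈ s := hts y hyt
      simp only [pvDropDups, if_pos hyt, if_pos hys]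
      exact ih s t hts
    · by_cases hys : y ∈ s
      · have hc : (!(s.contains y)) = false := by simp [List.contains_eq_mem, hys]
        simp only [pvDropDups, if_pos hys, if_neg hyt, List.filter_cons, hc,
          Bool.false_eq_true, if_false]
        exact ih s (t ++ [y]) (by intro x hx; rcases List.mem_append.mp hx with h | h
                                  · exact hts x h
                                  · simp at h; subst h; exact hys)
      · have hc : (!(s.contains y)) = true := by simp [List.contains_eq_mem, hys]
        simp only [pvDropDups, if_neg hys, if_neg hyt, List.filter_cons, hc, if_true]
        rw [ih (s ++ [y]) (t ++ [y]) (by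
          intro x hx; rcases List.mem_append.mp hx with h | h
          · exact List.mem_append.mpr (Or.inl (hts x h))
          · exact List.mem_append.mpr (Or.inr h))]
        refine congrArg _ (List.filter_congr ?_)
        intro x hx
        have hxt : x ∉ t ++ [y] := ((pv_mem_dropDups x xs (t ++ [y])).mp hx).2
        have hxy : x ≠ y := by intro h; subst h; exact hxt (by simp)
        simp [List.contains_eq_mem, hxy]

lemma pv_dropDups_append : ∀ (xs ys s : List String),
    pvDropDups s (xs ++ ys) = pvDropDups s xs ++ pvDropDups (s ++ pvDropDups s xs) ys := by
  intro xs
  induction xs with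
  | nil => intro ys s; simp [pvDropDups]
  | cons x xs ih =>
    intro ys s
    by_cases h : x ∈ s
    · simp only [List.cons_append, pvDropDups, if_pos h]
      exact ih ys s
    · simp only [List.cons_append, pvDropDups, if_neg h]
      rw [ih ys (s ++ [x])]
      simp

-- A's append-if-new loop equals filtering the deduplicated stream
lemma foldl_append_eq_filter_dropDups (P : String → Bool) :
    ∀ (xs seen acc : List String),
      (∀ y, P y = true → (y ∈ seen ↔ y ∈ acc)) →
      xs.foldl (fun acc node => if P node && !(acc.contains node) then acc ++ [node] else acc) acc
        = acc ++ (pvDropDups seen xs).filter P := by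
  intro xs
  induction xs with
  | nil => intro seen acc _; simp [pvDropDups]
  | cons x xs ih =>
    intro seen acc hinv
    by_cases hseen : x ∈ seen
    · have hstep : (if P x && !(acc.contains x) then acc ++ [x] else acc) = acc := by
        by_cases hp : P x = true
        · have hin : x ∈ acc := (hinv x hp).mp hseen
          simp [hp, hin]
        · simp [Bool.eq_false_iff.mpr hp]
      simp only [List.foldl_cons, hstep, pvDropDups, hseen, if_true]
      exact ih seen acc hinv
    · by_cases hp : P x = true
      · have hacc : x ∉ acc := fun hx => hseen ((hinv x hp).mpr hx)
        have hstep : (if P x && !(acc.contains x) then acc ++ [x] else acc) = acc ++ [x] := by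
          simp [hp, hacc]
        simp only [List.foldl_cons, hstep, pvDropDups, hseen, if_false]
        rw [ih (seen ++ [x]) (acc ++ [x]) (by
          intro y hy
          simp only [List.mem_append, List.mem_singleton]
          rw [hinv y hy])]
        simp [hp]
      · have hstep : (if P x && !(acc.contains x) then acc ++ [x] else acc) = acc := by
          simp [Bool.eq_false_iff.mpr hp]
        simp only [List.foldl_cons, hstep, pvDropDups, hseen, if_false]
        rw [ih (seen ++ [x]) acc (by
          intro y hy
          have hxy : y ≠ x := by intro h; subst h; exact hp hy
          simp only [List.mem_append, List.mem_singleton, hxy, or_false]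
          exact hinv y hy)]
        simp [Bool.eq_false_iff.mpr hp]

lemma getD_mk_of_mem (genotypes : List (String × List String))
    (h : (genotypes.map Prod.fst).Nodup) (p : String × List String) (hp : p ∈ genotypes) :
    PySem.Dict.getD (PySem.Dict.mk genotypes) p.1 [] = p.2 :=
  PySem.Dict.getD_of_mem_items (PySem.Dict.mk genotypes) hp h []

-- the last element A takes at index len-1 is the one B takes at index -1
lemma lastA_eq_lastB (geno : List String) (h : 1 < geno.length) :
    PySem.List.pyGetD geno ((geno.length : Int) - 1) "" = PySem.List.pyGetD geno (-1) "" := by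
  have hne : geno ≠ [] := by intro hnil; simp [hnil] at h
  rw [PySem.List.pyGetD_neg_one geno "" hne,
      PySem.List.pyGetD_eq_getElem geno "" (by omega) (by omega)]
  rw [List.getLast_eq_getElem]
  congr 1
  omega

-- membership in count_terminal_nodes = membership in the list of last elements of long paths
lemma ctn_fold (x : String) :
    ∀ (l : List (String × List String)) (tn : PySem.Dict String Int),
      (l.foldl (fun tn p =>
          if p.2.length ≤ 1 then tn
          else
            let t_node := PySem.List.pyGetD p.2 ((p.2.length : Int) - 1) ""
            let tn' := if !(tn.contains t_node) then tn.insert t_node 0 else tn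
            tn'.modify t_node 0 (· + 1)) tn).contains x
        = (tn.contains x ||
            (((l.map Prod.snd).filter (fun g => 1 < g.length)).map
              (fun p => PySem.List.pyGetD p (-1) "")).contains x) := by
  intro l
  induction l with
  | nil => intro tn; simp
  | cons q l ih =>
    intro tn
    by_cases hlen : q.2.length ≤ 1
    · have hng : (decide (1 < q.2.length)) = false := decide_eq_false (by omega)
      simp only [List.foldl_cons, if_pos hlen, List.map_cons, List.filter_cons, hng,
        Bool.false_eq_true, if_false]
      exact ih tn
    · have hgt : 1 < q.2.length := by omega
      have hg : (decide (1 < q.2.length)) = true := decide_eq_true hgt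
      simp only [List.foldl_cons, if_neg hlen, List.map_cons, List.filter_cons, hg, if_true]
      rw [ih]
      simp only [PySem.Dict.contains_modify]
      rw [lastA_eq_lastB q.2 hgt]
      by_cases hx : x = PySem.List.pyGetD q.2 (-1) ""
      · subst hx; simp
      · have hbeq : (x == PySem.List.pyGetD q.2 (-1) "") = false := by
          simp [hx]
        rcases hi : (!(PySem.Dict.contains tn (PySem.List.pyGetD q.2 (-1) ""))) with _ | _ <;>
          simp_all [PySem.Dict.contains_insert, Bool.or_left_comm, Bool.or_comm, Bool.or_assoc]

-- nested per-path fold = fold over the flattened candidate stream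
lemma foldl_drop_flat (g : List String → String → List String) :
    ∀ (l : List (String × List String)) (acc : List String),
      l.foldl (fun acc p => (p.2.drop 1).foldl g acc) acc
        = ((l.map Prod.snd).flatMap (fun p => p.drop 1)).foldl g acc := by
  intro l
  induction l with
  | nil => intro acc; simp
  | cons p l ih =>
    intro acc
    simp only [List.foldl_cons, List.map_cons, List.flatMap_cons, List.foldl_append]
    exact ih _

-- A's outer loop, with dict lookups resolved and the inner index loop turned into a drop-1 fold
lemma A_eq (genotypes : List (String × List String))
    (h : (genotypes.map Prod.fst).Nodup) :
    get_internal_nodes genotypes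
      = (pvCands (genotypes.map Prod.snd)).foldl
          (fun acc node =>
            if !((count_terminal_nodes genotypes).contains node) && !(acc.contains node) then
              acc ++ [node]
            else acc) [] := by
  unfold get_internal_nodes
  rw [PySem.List.foldl_congr_mem' genotypes _
      (fun acc p => (p.2.drop 1).foldl
        (fun acc node =>
          if !((count_terminal_nodes genotypes).contains node) && !(acc.contains node) then
            acc ++ [node]
          else acc) acc) []
      (by
        intro p hp acc
        rw [getD_mk_of_mem genotypes h p hp]
        by_cases hlen : p.2.length = 1
        · have hb : (p.2.length == 1) = true := by simpa using hlen
          have hnil : p.2.drop 1 = [] := List.drop_eq_nil_of_le (by omega)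
          simp only [hb, if_true, hnil, List.foldl_nil]
        · have hb : (p.2.length == 1) = false := by simpa using hlen
          simp only [hb, Bool.false_eq_true, if_false]
          exact PySem.List.foldl_pyRange_pyGetD' p.2 ""
            (fun acc node =>
              if !((count_terminal_nodes genotypes).contains node) && !(acc.contains node) then
                acc ++ [node]
              else acc) acc (a := 1) (by omega))]
  exact foldl_drop_flat _ genotypes []

lemma ctn_eq (genotypes : List (String × List String))
    (h : (genotypes.map Prod.fst).Nodup) (x : String) :
    (count_terminal_nodes genotypes).contains x
      = (pvLasts (genotypes.map Prod.snd)).contains x := by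
  unfold count_terminal_nodes
  rw [PySem.List.foldl_congr_mem' genotypes _
      (fun tn p =>
        if p.2.length ≤ 1 then tn
        else
          let t_node := PySem.List.pyGetD p.2 ((p.2.length : Int) - 1) ""
          let tn' := if !(tn.contains t_node) then tn.insert t_node 0 else tn
          tn'.modify t_node 0 (· + 1)) PySem.Dict.empty
      (by intro p hp acc; rw [getD_mk_of_mem genotypes h p hp])]
  rw [ctn_fold x genotypes PySem.Dict.empty]
  simp [pvLasts]

-- A in canonical form: dedup the candidate stream, then drop the terminal nodes
lemma A_canon (genotypes : List (String × List String))
    (h : (genotypes.map Prod.fst).Nodup) :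
    get_internal_nodes genotypes
      = (pvDropDups [] (pvCands (genotypes.map Prod.snd))).filter
          (fun x => !((pvLasts (genotypes.map Prod.snd)).contains x)) := by
  rw [A_eq genotypes h]
  rw [show (fun (acc : List String) (node : String) =>
        if !((count_terminal_nodes genotypes).contains node) && !(acc.contains node) then
          acc ++ [node]
        else acc)
      = (fun (acc : List String) (node : String) =>
        if (fun node => !((pvLasts (genotypes.map Prod.snd)).contains node)) node
            && !(acc.contains node) then
          acc ++ [node]
        else acc) from
    funext (fun acc => funext (fun node => by rw [ctn_eq genotypes h node]))]
  rw [foldl_append_eq_filter_dropDups _ _ [] [] (by intro y _; simp)]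
  simp

-- membership in the batch of nodes B appends while processing one path
lemma pv_mem_D1 (t : String) (D0 terminals internal : List String) (x : String) :
    x ∈ (pvDropDups (PySem.Set.add terminals t ++ internal.filter (· != t)) D0).filter
          (fun y => !(PySem.Set.contains (PySem.Set.add terminals t) y))
      ↔ x ∈ D0 ∧ x ∉ terminals ∧ x ≠ t ∧ x ∉ internal := by
  simp only [List.mem_filter, pv_mem_dropDups, List.mem_append, PySem.Set.mem_add,
    PySem.Set.contains, List.contains_eq_mem, List.mem_filter, bne_iff_ne, ne_eq,
    Bool.not_eq_true', decide_eq_false_iff_not]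
  tauto

-- the three piece equalities of the induction step (old internal / this path's batch / the rest)
lemma pvE1 (t : String) (L internal : List String) :
    (internal.filter (· != t)).filter (fun x => !(L.contains x))
      = internal.filter (fun x => !((t :: L).contains x)) := by
  rw [List.filter_filter]
  apply List.filter_congr
  intro x _
  rw [Bool.eq_iff_iff]
  simp only [Bool.and_eq_true, Bool.not_eq_true', List.contains_eq_mem,
    decide_eq_false_iff_not, List.mem_cons, bne_iff_ne, ne_eq]
  tauto

lemma pvE2 (t : String) (D0 L terminals internal : List String) :
    ((pvDropDups (PySem.Set.add terminals t ++ internal.filter (· != t)) D0).filter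
        (fun y => !(PySem.Set.contains (PySem.Set.add terminals t) y))).filter
        (fun x => !(L.contains x))
      = (pvDropDups (terminals ++ internal) D0).filter (fun x => !((t :: L).contains x)) := by
  rw [pv_dropDups_eq_filter D0 (PySem.Set.add terminals t ++ internal.filter (· != t)) []
      (by simp),
     pv_dropDups_eq_filter D0 (terminals ++ internal) [] (by simp)]
  simp only [List.filter_filter]
  apply List.filter_congr
  intro x _
  rw [Bool.eq_iff_iff]
  simp only [Bool.and_eq_true, Bool.not_eq_true', List.contains_eq_mem,
    decide_eq_false_iff_not, List.mem_cons, List.mem_append, List.mem_filter,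
    PySem.Set.mem_add, PySem.Set.contains, bne_iff_ne, ne_eq]
  tauto

lemma pvE3 (t : String) (D0 C L terminals internal : List String) :
    (pvDropDups (PySem.Set.add terminals t
          ++ (internal.filter (· != t)
              ++ (pvDropDups (PySem.Set.add terminals t ++ internal.filter (· != t)) D0).filter
                  (fun y => !(PySem.Set.contains (PySem.Set.add terminals t) y)))) C).filter
        (fun x => !(L.contains x))
      = (pvDropDups ((terminals ++ internal) ++ pvDropDups (terminals ++ internal) D0) C).filter
          (fun x => !((t :: L).contains x)) := by
  rw [pv_dropDups_eq_filter C
      (PySem.Set.add terminals t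
        ++ (internal.filter (· != t)
            ++ (pvDropDups (PySem.Set.add terminals t ++ internal.filter (· != t)) D0).filter
                (fun y => !(PySem.Set.contains (PySem.Set.add terminals t) y)))) [] (by simp),
    pv_dropDups_eq_filter C ((terminals ++ internal) ++ pvDropDups (terminals ++ internal) D0) []
      (by simp)]
  simp only [List.filter_filter]
  apply List.filter_congr
  intro x _
  rw [Bool.eq_iff_iff]
  simp only [Bool.and_eq_true, Bool.not_eq_true', List.contains_eq_mem,
    decide_eq_false_iff_not, List.mem_cons, List.mem_append, List.mem_filter,
    pv_mem_dropDups, PySem.Set.mem_add, PySem.Set.contains, bne_iff_ne, ne_eq]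
  tauto

-- B's single pass, characterised: deletions and the growing terminal set cancel out into
-- one dedup-then-filter of the whole stream
lemma B_fold : ∀ (gs : List (List String)) (internal terminals : List String),
    internal.Nodup → (∀ x ∈ internal, x ∉ terminals) →
    (gs.foldl pvBStep (internal, terminals)).1
      = internal.filter (fun x => !((pvLasts gs).contains x))
        ++ (pvDropDups (terminals ++ internal) (pvCands gs)).filter
            (fun x => !((pvLasts gs).contains x)) := by
  intro gs
  induction gs with
  | nil =>
    intro internal terminals _ _
    simp [pvLasts, pvCands, pvDropDups]
  | cons g rest ih =>
    intro internal terminals hnd hdisj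
    by_cases hlen : g.length ≤ 1
    · have hstep : pvBStep (internal, terminals) g = (internal, terminals) := by
        simp [pvBStep, if_pos hlen]
      have hl : pvLasts (g :: rest) = pvLasts rest := by
        simp [pvLasts, decide_eq_false (show ¬ 1 < g.length by omega)]
      have hc : pvCands (g :: rest) = pvCands rest := by
        simp only [pvCands, List.flatMap_cons]
        rw [List.drop_eq_nil_of_le hlen]
        simp
      simp only [List.foldl_cons, hstep, hl, hc]
      exact ih internal terminals hnd hdisj
    · have hgt : 1 < g.length := by omega
      -- the step, written out: erase = filter, slice = drop, inner loop = filtered dedup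
      have h1 : (if internal.contains (PySem.List.pyGetD g (-1) "") then
            internal.erase (PySem.List.pyGetD g (-1) "") else internal)
          = internal.filter (· != PySem.List.pyGetD g (-1) "") := by
        by_cases hcon : internal.contains (PySem.List.pyGetD g (-1) "")
        · rw [if_pos hcon]; exact hnd.erase_eq_filter _
        · rw [if_neg hcon]
          have hni : PySem.List.pyGetD g (-1) "" ∉ internal := by
            simpa [List.contains_eq_mem] using hcon
          exact (List.filter_eq_self.mpr (fun x hx => by
            simp only [bne_iff_ne, ne_eq]
            intro h; subst h; exact hni hx)).symm
      have h2 : PySem.List.slice g (some 1) none = g.drop 1 := by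
        rw [PySem.List.slice_from g (by omega)]; norm_num
      have hstep : pvBStep (internal, terminals) g
          = (internal.filter (· != PySem.List.pyGetD g (-1) "")
              ++ (pvDropDups (PySem.Set.add terminals (PySem.List.pyGetD g (-1) "")
                    ++ internal.filter (· != PySem.List.pyGetD g (-1) ""))
                  (g.drop 1)).filter
                  (fun y => !(PySem.Set.contains
                      (PySem.Set.add terminals (PySem.List.pyGetD g (-1) "")) y)),
             PySem.Set.add terminals (PySem.List.pyGetD g (-1) "")) := by
        simp only [pvBStep, if_neg (show ¬ g.length ≤ 1 by omega)]
        rw [h2]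
        simp only [h1]
        rw [foldl_append_eq_filter_dropDups
            (fun node => !(PySem.Set.contains
                (PySem.Set.add terminals (PySem.List.pyGetD g (-1) "")) node))
            (g.drop 1)
            (PySem.Set.add terminals (PySem.List.pyGetD g (-1) "")
              ++ internal.filter (· != PySem.List.pyGetD g (-1) ""))
            (internal.filter (· != PySem.List.pyGetD g (-1) ""))
            (by
              intro y hy
              have hnt : y ∉ PySem.Set.add terminals (PySem.List.pyGetD g (-1) "") := by
                intro hmem
                have hco := (PySem.Set.contains_iff _ y).mpr hmem
                simp [PySem.Set.contains] at hco
                simp [PySem.Set.contains, hco] at hy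
              simp [List.mem_append, hnt])]
      have hlcons : pvLasts (g :: rest)
          = PySem.List.pyGetD g (-1) "" :: pvLasts rest := by
        simp [pvLasts, decide_eq_true hgt]
      have hccons : pvCands (g :: rest) = g.drop 1 ++ pvCands rest := by
        simp [pvCands]
      -- invariants for the tail of the pass
      have hnd2 : (internal.filter (· != PySem.List.pyGetD g (-1) "")
          ++ (pvDropDups (PySem.Set.add terminals (PySem.List.pyGetD g (-1) "")
                ++ internal.filter (· != PySem.List.pyGetD g (-1) ""))
              (g.drop 1)).filter
              (fun y => !(PySem.Set.contains
                  (PySem.Set.add terminals (PySem.List.pyGetD g (-1) "")) y))).Nodup := by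
        refine (hnd.filter _).append ((pv_nodup_dropDups _ _).filter _) ?_
        intro a ha haD
        exact ((pv_mem_D1 _ _ _ _ a).mp haD).2.2.2 (List.mem_of_mem_filter ha)
      have hdisj2 : ∀ x ∈ internal.filter (· != PySem.List.pyGetD g (-1) "")
          ++ (pvDropDups (PySem.Set.add terminals (PySem.List.pyGetD g (-1) "")
                ++ internal.filter (· != PySem.List.pyGetD g (-1) ""))
              (g.drop 1)).filter
              (fun y => !(PySem.Set.contains
                  (PySem.Set.add terminals (PySem.List.pyGetD g (-1) "")) y)),
          x ∉ PySem.Set.add terminals (PySem.List.pyGetD g (-1) "") := by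
        intro x hx hmem
        rcases List.mem_append.mp hx with h1 | h1
        · have hxi : x ∈ internal ∧ ¬ x = PySem.List.pyGetD g (-1) "" := by
            simpa using h1
          rcases (PySem.Set.mem_add terminals (PySem.List.pyGetD g (-1) "") x).mp hmem with h | h
          · exact hdisj x hxi.1 h
          · exact hxi.2 h
        · have hD := (pv_mem_D1 _ _ _ _ x).mp h1
          rcases (PySem.Set.mem_add terminals (PySem.List.pyGetD g (-1) "") x).mp hmem with h | h
          · exact hD.2.1 h
          · exact hD.2.2.1 h
      rw [List.foldl_cons, hstep, ih _ _ hnd2 hdisj2, hlcons, hccons, pv_dropDups_append]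
      simp only [List.filter_append]
      rw [List.append_assoc]
      refine congrArg₂ _ (pvE1 _ _ _) (congrArg₂ _ (pvE2 _ _ _ _ _) (pvE3 _ _ _ _ _ _))

-- B in the same canonical form
lemma B_canon (genotypes : List (String × List String)) :
    get_internal_nodes_alt genotypes
      = (pvDropDups [] (pvCands (genotypes.map Prod.snd))).filter
          (fun x => !((pvLasts (genotypes.map Prod.snd)).contains x)) := by
  unfold get_internal_nodes_alt
  rw [show ((PySem.Dict.mk genotypes).values) = genotypes.map Prod.snd from by
    simp [PySem.Dict.values_mk]]
  rw [B_fold (genotypes.map Prod.snd) [] PySem.Set.empty (by simp) (by simp [PySem.Set.empty])]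
  simp [PySem.Set.empty]

-- ===== VERDICT (by name: the statement is the Claim_ definition above) =====
theorem get_internal_nodes_spec : Claim_equal_get_internal_nodes := by
  intro genotypes _ hpre
  unfold Spec_get_internal_nodes
  rw [A_canon genotypes hpre, B_canon genotypes]
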